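-- pv_equiv track=rewrite | github.com/submissionUnkown/Gilbert | src/prepare_data.py | mapper_index_dict
-- ===== SOURCE A (Python) =====
-- def mapper_index_dict(dict_embeds):
--     mapper_idx = {}
--     i = 0
--     for ent, val in dict_embeds.items():
--         for idx in range(i, i + len(val)):
--             mapper_idx[idx] = ent
--         i += len(val)
--     return mapper_idx
-- ===== SOURCE B (Python) =====
-- def mapper_index_dict(dict_embeds):
--     ents = []
--     bounds = [0]
--     for ent, val in dict_embeds.items():
--         ents.append(ent)
--         bounds.append(bounds[-1] + len(val))
--
--     def group_of(idx):
--         lo, hi = 0, len(ents) - 1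
--         while lo < hi:
--             mid = (lo + hi) // 2
--             if bounds[mid + 1] <= idx:
--                 lo = mid + 1
--             else:
--                 hi = mid
--         return lo
--
--     return {idx: ents[group_of(idx)] for idx in range(bounds[-1])}
-- ===== Notes on version B (the rewrite author's own statement) =====
-- stated objective: alternative
-- what changed: Inverts the mapping direction: instead of emitting consecutive indices with a running counter while walking the groups, B builds a cumulative-bounds array once and then, for each flat index 0..total-1, binary-searches the bounds to find the group containing that index.
import Mathlib
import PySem

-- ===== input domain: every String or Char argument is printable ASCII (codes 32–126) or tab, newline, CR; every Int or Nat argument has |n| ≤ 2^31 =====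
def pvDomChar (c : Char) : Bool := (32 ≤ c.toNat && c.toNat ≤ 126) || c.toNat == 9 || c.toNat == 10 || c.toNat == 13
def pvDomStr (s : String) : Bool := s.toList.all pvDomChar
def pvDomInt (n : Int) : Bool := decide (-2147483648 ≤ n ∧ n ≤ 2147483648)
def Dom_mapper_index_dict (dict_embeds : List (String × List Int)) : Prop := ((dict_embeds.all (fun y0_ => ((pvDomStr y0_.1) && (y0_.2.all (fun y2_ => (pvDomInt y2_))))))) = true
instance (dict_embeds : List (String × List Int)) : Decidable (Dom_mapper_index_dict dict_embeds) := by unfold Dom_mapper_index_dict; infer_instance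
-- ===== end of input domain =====

-- B inverts the mapping direction: it builds a cumulative-bounds array once and, for
-- each flat index, binary-searches the bounds for the group containing that index —
-- an alternative index-major algorithm (same result; not claimed faster).


-- ===== PORT A =====
-- mapper_idx = {}; i = 0; for ent, val: for idx in range(i, i+len(val)): mapper_idx[idx] = ent; i += len(val)
def mapper_index_dict (dict_embeds : List (String × List Int)) : List (Int × String) :=
  (dict_embeds.foldl
    (fun (st : PySem.Dict Int String × Int) ev =>
      ((PySem.List.pyRange st.2 (st.2 + ev.2.length) 1).foldl
          (fun d idx => d.insert idx ev.1) st.1,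
        st.2 + (ev.2.length : Int)))
    (PySem.Dict.empty, 0)).1.items

-- ===== PORT B =====
-- group_of(idx): lo, hi = 0, len(ents)-1; while lo < hi: mid = (lo+hi)//2;
--   lo = mid+1 if bounds[mid+1] <= idx else (hi = mid); return lo
-- bounds[mid+1] is always in range here (0 ≤ mid+1 ≤ len(ents)-1 < len(bounds)),
-- so pyGetD with default 0 is exact.
def pvGroupOf (bounds : List Int) (idx : Int) (lo hi : Int) : Int :=
  if lo < hi then
    let mid := PySem.Int.floordiv (lo + hi) 2
    if PySem.List.pyGetD bounds (mid + 1) 0 ≤ idx then pvGroupOf bounds idx (mid + 1) hi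
    else pvGroupOf bounds idx lo mid
  else lo
termination_by (hi - lo).toNat
decreasing_by
  · have : PySem.Int.floordiv (lo + hi) 2 = (lo + hi) / 2 := by
      simp [PySem.Int.floordiv, Int.fdiv_eq_ediv]
    simp only [this]; omega
  · have : PySem.Int.floordiv (lo + hi) 2 = (lo + hi) / 2 := by
      simp [PySem.Int.floordiv, Int.fdiv_eq_ediv]
    simp only [this]; omega

-- ents = []; bounds = [0]; for ent, val: ents.append(ent); bounds.append(bounds[-1] + len(val))
-- return {idx: ents[group_of(idx)] for idx in range(bounds[-1])}
-- bounds is never empty, so bounds[-1] = pyGetD bounds (-1) 0 is exact; the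
-- comprehension's keys are the distinct increasing range, so the dict's item list is
-- exactly the list of pairs; ents[group_of(idx)] is always in range for
-- 0 ≤ idx < bounds[-1], so pyGet? never returns none and .getD "" never fires.
def mapper_index_dict_alt (dict_embeds : List (String × List Int)) : List (Int × String) :=
  let eb := dict_embeds.foldl
    (fun (p : List String × List Int) ev =>
      (p.1 ++ [ev.1], p.2 ++ [PySem.List.pyGetD p.2 (-1) 0 + ev.2.length]))
    (([] : List String), ([0] : List Int))
  let ents := eb.1
  let bounds := eb.2
  (PySem.List.pyRange 0 (PySem.List.pyGetD bounds (-1) 0) 1).map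
    (fun idx =>
      (idx, (PySem.List.pyGet? ents (pvGroupOf bounds idx 0 ((ents.length : Int) - 1))).getD ""))

-- ===== PRECONDITION & SPEC =====
def Spec_mapper_index_dict (dict_embeds : List (String × List Int)) (out : List (Int × String)) : Prop := out = mapper_index_dict_alt dict_embeds
instance (dict_embeds : List (String × List Int)) (out : List (Int × String)) : Decidable (Spec_mapper_index_dict dict_embeds out) := by unfold Spec_mapper_index_dict; infer_instance

-- ===== CLAIM (what is proved, stated in full; the proofs are below) =====
def Claim_equal_mapper_index_dict : Prop := ∀ (dict_embeds : List (String × List Int)), Dom_mapper_index_dict dict_embeds → Spec_mapper_index_dict dict_embeds (mapper_index_dict dict_embeds)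

-- ===== LEMMAS AND PROOFS =====

-- the flat label list both algorithms are about
def pvFlat (de : List (String × List Int)) : List String :=
  de.flatMap (fun ev => List.replicate ev.2.length ev.1)

-- total length of the first k groups
def pvLenSum (de : List (String × List Int)) (k : Nat) : Int :=
  ((de.take k).map (fun ev => (ev.2.length : Int))).sum

-- the cumulative sums appended to bounds by B's first loop
def pvCum : List (String × List Int) → Int → List Int
  | [], _ => []
  | ev :: tl, s => (s + ev.2.length) :: pvCum tl (s + ev.2.length)

-- enumerate of a replicated list is the corresponding range paired with the constant
theorem pv_enum_replicate (x : String) : ∀ (n : Nat) (i : Int),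
    PySem.List.enumerate (List.replicate n x) i
      = (PySem.List.pyRange i (i + n) 1).map (fun a => (a, x)) := by
  intro n
  induction n with
  | zero => intro i; simp [PySem.List.enumerate_nil, PySem.List.pyRange_one_eq_nil]
  | succ m ih =>
    intro i
    rw [List.replicate_succ, PySem.List.enumerate_cons,
        PySem.List.pyRange_one_cons (by push_cast; omega)]
    simp only [List.map_cons]
    rw [ih (i + 1)]
    congr 1
    push_cast; ring_nf

-- loop invariant for A's fold: with all keys of d below i, the loop appends enumerate of the flat tail
theorem pv_loopA (de : List (String × List Int)) :
    ∀ (d : PySem.Dict Int String) (i : Int),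
      d.keys.Nodup → (∀ k ∈ d.keys, k < i) →
      (de.foldl
        (fun (st : PySem.Dict Int String × Int) ev =>
          ((PySem.List.pyRange st.2 (st.2 + ev.2.length) 1).foldl
              (fun d idx => d.insert idx ev.1) st.1,
            st.2 + (ev.2.length : Int)))
        (d, i)).1.items
      = d.items ++ PySem.List.enumerate (pvFlat de) i := by
  induction de with
  | nil => intro d i _ _; simp [pvFlat, PySem.List.enumerate_nil]
  | cons hd tl ih =>
    intro d i hnd hlt
    have hfresh : ∀ a ∈ PySem.List.pyRange i (i + hd.2.length) 1,
        d.contains a = false := by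
      intro a ha
      rw [PySem.List.mem_pyRange_one] at ha
      by_contra hc
      have : a ∈ d.keys := by
        rw [← PySem.Dict.contains_iff_mem_keys]
        cases h : d.contains a with
        | false => exact absurd h hc
        | true => rfl
      exact absurd (hlt a this) (by omega)
    have hitems :
        ((PySem.List.pyRange i (i + hd.2.length) 1).foldl
            (fun d idx => d.insert idx hd.1) d).items
          = d.items ++ (PySem.List.pyRange i (i + hd.2.length) 1).map (fun a => (a, hd.1)) := by
      have := PySem.Dict.items_foldl_insert_fresh
        (l := PySem.List.pyRange i (i + hd.2.length) 1)
        (k := fun a => a) (v := fun _ => hd.1) (d := d)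
        (by intro a ha; exact hfresh a ha)
        (by simpa using PySem.List.nodup_pyRange_one i (i + hd.2.length))
      simpa using this
    set d' := (PySem.List.pyRange i (i + hd.2.length) 1).foldl
        (fun d idx => d.insert idx hd.1) d with hd'
    have hkeys' : d'.keys = d.keys ++ PySem.List.pyRange i (i + hd.2.length) 1 := by
      show d'.items.map (·.1) = _
      rw [hitems]
      simp [PySem.Dict.keys, List.map_map, Function.comp_def]
    have hnd' : d'.keys.Nodup := by
      rw [hkeys', List.nodup_append]
      refine ⟨hnd, PySem.List.nodup_pyRange_one _ _, ?_⟩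
      intro a ha b hb
      rw [PySem.List.mem_pyRange_one] at hb
      have := hlt a ha
      omega
    have hlt' : ∀ k ∈ d'.keys, k < i + hd.2.length := by
      intro k hk
      rw [hkeys', List.mem_append] at hk
      rcases hk with h | h
      · have := hlt k h; omega
      · rw [PySem.List.mem_pyRange_one] at h; omega
    have hIH := ih d' (i + hd.2.length) hnd' hlt'
    simp only [List.foldl_cons]
    rw [hIH]
    rw [hitems]
    simp only [pvFlat, List.flatMap_cons]
    rw [PySem.List.enumerate_append, pv_enum_replicate]
    simp [List.append_assoc, List.length_replicate]

-- B's first loop appends the entity names and the cumulative sums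
theorem pv_loopB (de : List (String × List Int)) :
    ∀ (es : List String) (bs : List Int) (s : Int) (h : bs ≠ []),
      bs.getLast h = s →
      de.foldl
        (fun (p : List String × List Int) ev =>
          (p.1 ++ [ev.1], p.2 ++ [PySem.List.pyGetD p.2 (-1) 0 + ev.2.length]))
        (es, bs)
      = (es ++ de.map (fun ev => ev.1), bs ++ pvCum de s) := by
  induction de with
  | nil => intro es bs s h hl; simp [pvCum]
  | cons hd tl ih =>
    intro es bs s h hl
    simp only [List.foldl_cons]
    rw [PySem.List.pyGetD_neg_one _ _ h, hl]
    have h' : bs ++ [s + (hd.2.length : Int)] ≠ [] := by simp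
    rw [ih (es ++ [hd.1]) _ (s + hd.2.length) h' (by simp)]
    simp [pvCum, List.append_assoc]

-- length of the cumulative list
theorem pv_cum_length (de : List (String × List Int)) : ∀ s, (pvCum de s).length = de.length := by
  induction de with
  | nil => intro s; simp [pvCum]
  | cons hd tl ih => intro s; simp [pvCum, ih]

-- the bounds list indexes to the partial sums
theorem pv_bounds_getElem? (de : List (String × List Int)) : ∀ (s : Int) (k : Nat),
    k < de.length → (pvCum de s)[k]? = some (s + pvLenSum de (k + 1)) := by
  induction de with
  | nil => intro s k hk; simp at hk
  | cons hd tl ih =>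
    intro s k hk
    cases k with
    | zero => simp [pvCum, pvLenSum]
    | succ m =>
      have hm : m < tl.length := by simpa using hk
      simp only [pvCum, List.getElem?_cons_succ]
      rw [ih (s + hd.2.length) m hm]
      simp only [pvLenSum, List.take_succ_cons, List.map_cons, List.sum_cons]
      congr 1
      ring

theorem pv_bounds_at (de : List (String × List Int)) (j : Nat) (hj : j ≤ de.length) :
    (0 :: pvCum de 0)[j]? = some (pvLenSum de j) := by
  cases j with
  | zero => simp [pvLenSum]
  | succ m =>
    simp only [List.getElem?_cons_succ]
    rw [pv_bounds_getElem? de 0 m (by omega)]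
    simp

-- partial sums are nonnegative
theorem pv_lenSum_nonneg (de : List (String × List Int)) (k : Nat) : 0 ≤ pvLenSum de k := by
  unfold pvLenSum
  apply List.sum_nonneg
  intro x hx
  simp only [List.mem_map] at hx
  obtain ⟨ev, _, rfl⟩ := hx
  positivity

-- the total is the flat list's length
theorem pv_lenSum_total (de : List (String × List Int)) :
    pvLenSum de de.length = ((pvFlat de).length : Int) := by
  induction de with
  | nil => simp [pvLenSum, pvFlat]
  | cons hd tl ih =>
    simp only [pvLenSum, pvFlat, List.length_cons, List.take_succ_cons, List.map_cons,
      List.sum_cons, List.flatMap_cons, List.length_append, List.length_replicate] at *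
    rw [ih]; push_cast; ring

-- binary search over the bounds finds a group whose slice contains idx
theorem pv_search (de : List (String × List Int)) (idx : Int) :
    ∀ (m : Nat) (lo hi : Int), (hi - lo).toNat = m →
      0 ≤ lo → lo ≤ hi → hi ≤ (de.length : Int) - 1 →
      pvLenSum de lo.toNat ≤ idx → idx < pvLenSum de (hi.toNat + 1) →
      let g := pvGroupOf (0 :: pvCum de 0) idx lo hi
      0 ≤ g ∧ g ≤ (de.length : Int) - 1 ∧ pvLenSum de g.toNat ≤ idx ∧
        idx < pvLenSum de (g.toNat + 1) := by
  intro m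
  induction m using Nat.strong_induction_on with
  | _ m ihm =>
    intro lo hi hm h0 hle hhi hlow hhigh
    rw [pvGroupOf]
    by_cases hlt : lo < hi
    · simp only [if_pos hlt]
      have hmid : PySem.Int.floordiv (lo + hi) 2 = (lo + hi) / 2 := by
        simp [PySem.Int.floordiv, Int.fdiv_eq_ediv]
      set mid := PySem.Int.floordiv (lo + hi) 2 with hmiddef
      have hmb : lo ≤ mid ∧ mid < hi := by rw [hmid]; omega
      obtain ⟨hmb1, hmb2⟩ := hmb
      clear_value mid
      have hblen : (pvCum de 0).length = de.length := pv_cum_length de 0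
      have hidx : (mid + 1).toNat ≤ de.length := by omega
      have hget : PySem.List.pyGetD (0 :: pvCum de 0) (mid + 1) 0
          = pvLenSum de (mid + 1).toNat := by
        rw [PySem.List.pyGetD_eq_getElem _ _ (by omega) (by simp [hblen]; omega)]
        have := pv_bounds_at de (mid + 1).toNat hidx
        have hlt' : (mid + 1).toNat < (0 :: pvCum de 0).length := by simp [hblen]; omega
        rw [List.getElem?_eq_getElem hlt'] at this
        exact Option.some.inj this
      rw [hget]
      by_cases hc : pvLenSum de (mid + 1).toNat ≤ idx
      · simp only [if_pos hc]
        exact ihm (hi - (mid + 1)).toNat (by omega) (mid + 1) hi rfl (by omega)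
          (by omega) hhi hc hhigh
      · simp only [if_neg hc]
        have heqn : (mid + 1).toNat = mid.toNat + 1 := by omega
        have hlt2 : idx < pvLenSum de (mid.toNat + 1) := by rw [← heqn]; omega
        exact ihm (mid - lo).toNat (by omega) lo mid rfl h0 (by omega) (by omega)
          hlow hlt2
    · simp only [if_neg hlt]
      have : lo = hi := by omega
      subst this
      exact ⟨h0, by omega, hlow, hhigh⟩

-- a group's slice of the flat list holds its entity name
theorem pv_flat_at (de : List (String × List Int)) : ∀ (g : Nat) (idx : Int),
    g < de.length → pvLenSum de g ≤ idx → idx < pvLenSum de (g + 1) →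
    (pvFlat de)[idx.toNat]? = (de.map (fun ev => ev.1))[g]? := by
  induction de with
  | nil => intro g idx hg _ _; simp at hg
  | cons hd tl ih =>
    intro g idx hg hlow hhigh
    cases g with
    | zero =>
      have h0 : (0:Int) ≤ idx := by
        simpa [pvLenSum] using hlow
      have h1 : idx < (hd.2.length : Int) := by
        simpa [pvLenSum] using hhigh
      simp only [pvFlat, List.flatMap_cons, List.map_cons, List.getElem?_cons_zero]
      rw [List.getElem?_append_left (by simp; omega)]
      simp [show idx.toNat < hd.2.length by omega]
    | succ m =>
      have hm : m < tl.length := by simpa using hg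
      have hlow' : (hd.2.length : Int) + pvLenSum tl m ≤ idx := by
        simpa [pvLenSum, List.take_succ_cons] using hlow
      have hhigh' : idx < (hd.2.length : Int) + pvLenSum tl (m + 1) := by
        simpa [pvLenSum, List.take_succ_cons] using hhigh
      have hpos : 0 ≤ pvLenSum tl m := pv_lenSum_nonneg tl m
      simp only [pvFlat, List.flatMap_cons, List.map_cons, List.getElem?_cons_succ]
      rw [List.getElem?_append_right (by simp; omega)]
      have harith : idx.toNat - (List.replicate hd.2.length hd.1).length
          = (idx - hd.2.length).toNat := by simp
      have hb1 : pvLenSum tl m ≤ idx - hd.2.length := by omega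
      have hb2 : idx - hd.2.length < pvLenSum tl (m + 1) := by omega
      have hrec := ih m (idx - hd.2.length) hm hb1 hb2
      rw [harith]
      exact hrec

-- ===== VERDICT (by name: the statement is the Claim_ definition above) =====
theorem mapper_index_dict_spec : Claim_equal_mapper_index_dict := by
  intro de _
  unfold Spec_mapper_index_dict mapper_index_dict mapper_index_dict_alt
  rw [pv_loopA de PySem.Dict.empty 0 (by simp) (by simp)]
  simp only [PySem.Dict.empty]
  rw [List.nil_append]
  rw [pv_loopB de [] [0] 0 (by simp) (by simp)]
  simp only [List.nil_append, List.singleton_append]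
  have hblen : (pvCum de 0).length = de.length := pv_cum_length de 0
  have hlast : PySem.List.pyGetD (0 :: pvCum de 0) (-1) 0 = pvLenSum de de.length := by
    rw [PySem.List.pyGetD_neg_one _ _ (by simp), List.getLast_eq_getElem]
    have h2 : (0 :: pvCum de 0)[(0 :: pvCum de 0).length - 1]? = some (pvLenSum de de.length) := by
      rw [show (0 :: pvCum de 0).length - 1 = de.length from by simp [hblen]]
      exact pv_bounds_at de de.length (le_refl _)
    rw [List.getElem?_eq_getElem (by simp)] at h2
    exact Option.some.inj h2
  rw [hlast, pv_lenSum_total de]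
  rw [PySem.List.enumerate_eq_map_pyRange (d := "")]
  simp only [List.length_map]
  apply List.map_congr_left
  intro a ha
  rw [PySem.List.mem_pyRange_one] at ha
  have h0 : 0 ≤ a := ha.1
  have hlt : a < ((pvFlat de).length : Int) := ha.2
  have hlt' : a < pvLenSum de de.length := by rw [pv_lenSum_total de]; exact hlt
  have hne : 1 ≤ de.length := by
    by_contra hn
    have : de = [] := by
      cases de with
      | nil => rfl
      | cons x xs => simp at hn
    subst this
    simp [pvLenSum] at hlt'
    omega
  have hs := pv_search de a ((((de.length : Int) - 1) - 0).toNat) 0 ((de.length : Int) - 1)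
    rfl (le_refl _) (by omega) (le_refl _)
    (by simp [pvLenSum]; exact h0)
    (by rw [show (((de.length : Int) - 1).toNat + 1) = de.length by omega]; exact hlt')
  obtain ⟨hg0, hg1, hg2, hg3⟩ := hs
  set g := pvGroupOf (0 :: pvCum de 0) a 0 ((de.length : Int) - 1) with hgdef
  have hglt : g.toNat < de.length := by omega
  have hgcast : g = ((g.toNat : Nat) : Int) := by omega
  congr 1
  rw [hgcast, PySem.List.pyGet?_natCast]
  rw [← pv_flat_at de g.toNat a hglt (by omega) (by omega)]
  rw [PySem.List.pyGetD_eq_getElem _ _ (by omega) (by omega)]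
  have hn : a.toNat < (pvFlat de).length := by omega
  simp [List.getElem?_eq_getElem hn]
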